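-- pv_equiv track=rewrite | github.com/JustAHobbyDev/MiroFish | backend/app/services/bounded_entity_route_review_surface_builder.py | _lane_metrics
-- ===== SOURCE A (Python) =====
-- from typing import Any, Dict, List
--
-- def _coerce_string(value: Any) -> str:
--     if value is None:
--         return ""
--     return str(value).strip()
--
-- def _lane_metrics(rows: List[Dict[str, Any]]) -> Dict[str, Dict[str, int]]:
--     metrics: Dict[str, Dict[str, int]] = {}
--     for row in rows:
--         system_label = _coerce_string(row.get("system_label"))
--         lane = metrics.setdefault(
--             system_label,
--             {
--                 "row_count": 0,
--                 "supported_public_count": 0,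
--                 "supported_private_count": 0,
--                 "high_priority_count": 0,
--             },
--         )
--         lane["row_count"] += 1
--         if _coerce_string(row.get("support_status")) == "supported_public_filing":
--             lane["supported_public_count"] += 1
--         if _coerce_string(row.get("support_status")) == "supported_private_company":
--             lane["supported_private_count"] += 1
--         if _coerce_string(row.get("route_aware_priority_tier")) == "high":
--             lane["high_priority_count"] += 1
--     return metrics
-- ===== SOURCE B (Python) =====
-- from typing import Any, Dict, List
--
--
-- def _coerce_string(value: Any) -> str:
--     if value is None:
--         return ""
--     return str(value).strip()
--
--
-- def _lane_metrics(rows: List[Dict[str, Any]]) -> Dict[str, Dict[str, int]]: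
--     # Partition-then-aggregate: one grouping pass, then per-lane tallies.
--     groups: Dict[str, List[Dict[str, Any]]] = {}
--     for row in rows:
--         label = _coerce_string(row.get("system_label"))
--         groups[label] = groups.get(label, []) + [row]
--     return {
--         label: {
--             "row_count": len(bucket),
--             "supported_public_count": sum(
--                 1 for r in bucket
--                 if _coerce_string(r.get("support_status")) == "supported_public_filing"
--             ),
--             "supported_private_count": sum(
--                 1 for r in bucket
--                 if _coerce_string(r.get("support_status")) == "supported_private_company"
--             ),
--             "high_priority_count": sum(
--                 1 for r in bucket
--                 if _coerce_string(r.get("route_aware_priority_tier")) == "high"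
--             ),
--         }
--         for label, bucket in groups.items()
--     }
-- ===== Notes on version B (the rewrite author's own statement) =====
-- stated objective: alternative
-- what changed: Replaced the single fused loop that mutates per-lane counter dicts in place by a partition-then-aggregate shape: one pass groups rows into buckets keyed by the coerced system_label (preserving first-seen order), then each lane's metrics dict is built at once from its bucket with len and per-predicate sums.
import Mathlib
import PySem

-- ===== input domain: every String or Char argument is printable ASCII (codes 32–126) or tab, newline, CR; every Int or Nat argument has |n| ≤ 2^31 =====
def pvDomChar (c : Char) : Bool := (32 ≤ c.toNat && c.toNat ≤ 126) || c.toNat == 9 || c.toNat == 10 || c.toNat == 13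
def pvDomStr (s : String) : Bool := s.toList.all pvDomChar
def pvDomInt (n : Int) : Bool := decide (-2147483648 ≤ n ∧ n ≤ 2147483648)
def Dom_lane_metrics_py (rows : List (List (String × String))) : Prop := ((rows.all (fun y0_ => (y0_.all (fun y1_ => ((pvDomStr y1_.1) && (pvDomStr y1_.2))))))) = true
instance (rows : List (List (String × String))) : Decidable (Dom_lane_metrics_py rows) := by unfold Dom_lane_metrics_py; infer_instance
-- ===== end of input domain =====

-- B replaces A's fused counting loop (in-place per-lane counter dicts) by a partition-then-aggregate
-- decomposition: one grouping pass by coerced system_label, then each lane's metrics built from its bucket.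


-- ===== PORT A =====
-- shared helpers mirroring the Python helpers both implementations call:
-- row.get(k) on a dict given as an association list (dict construction: later duplicates overwrite)
def pvRowGet (row : List (String × String)) (k : String) : Option String :=
  (PySem.Dict.ofList row).get? k

-- _coerce_string: None → "", else str(value).strip() (values here are strings, so str is the identity)
def pvCoerce (v : Option String) : String :=
  match v with
  | none => ""
  | some s => PySem.Str.strip s

def pvDefaultLane : PySem.Dict String Int :=
  PySem.Dict.ofList
    [("row_count", 0), ("supported_public_count", 0),
     ("supported_private_count", 0), ("high_priority_count", 0)]

-- the in-place updates A performs on the lane dict of the current row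
def pvLaneUpdate (lane : PySem.Dict String Int) (row : List (String × String)) :
    PySem.Dict String Int :=
  let lane1 := lane.modify "row_count" 0 (· + 1)
  let lane2 := if pvCoerce (pvRowGet row "support_status") == "supported_public_filing"
    then lane1.modify "supported_public_count" 0 (· + 1) else lane1
  let lane3 := if pvCoerce (pvRowGet row "support_status") == "supported_private_company"
    then lane2.modify "supported_private_count" 0 (· + 1) else lane2
  if pvCoerce (pvRowGet row "route_aware_priority_tier") == "high"
    then lane3.modify "high_priority_count" 0 (· + 1) else lane3

-- one iteration of A's loop: setdefault, read the lane, update it in place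
def pvStepA (m : PySem.Dict String (PySem.Dict String Int)) (row : List (String × String)) :
    PySem.Dict String (PySem.Dict String Int) :=
  let label := pvCoerce (pvRowGet row "system_label")
  let m1 := m.setdefault label pvDefaultLane
  let lane := (m1.get? label).getD pvDefaultLane
  m1.insert label (pvLaneUpdate lane row)

def lane_metrics_py (rows : List (List (String × String))) : List (String × List (String × Int)) :=
  ((rows.foldl pvStepA PySem.Dict.empty).items.map (fun p => (p.1, p.2.items)))

-- ===== PORT B =====
-- metrics dict of one lane, built from its bucket of rows (len + per-predicate 0/1 sums)
def pvBucketMetrics (bucket : List (List (String × String))) : List (String × Int) :=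
  [("row_count", (bucket.length : Int)),
   ("supported_public_count",
     ((bucket.countP (fun r => pvCoerce (pvRowGet r "support_status") == "supported_public_filing") : Int))),
   ("supported_private_count",
     ((bucket.countP (fun r => pvCoerce (pvRowGet r "support_status") == "supported_private_company") : Int))),
   ("high_priority_count",
     ((bucket.countP (fun r => pvCoerce (pvRowGet r "route_aware_priority_tier") == "high") : Int)))]

-- B's grouping step: groups[label] = groups.get(label, []) + [row]
def pvStepB (g : PySem.Dict String (List (List (String × String))))
    (row : List (String × String)) : PySem.Dict String (List (List (String × String))) :=
  g.modify (pvCoerce (pvRowGet row "system_label")) [] (· ++ [row])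

def lane_metrics_py_alt (rows : List (List (String × String))) :
    List (String × List (String × Int)) :=
  let groups := rows.foldl pvStepB PySem.Dict.empty
  groups.items.map (fun p => (p.1, pvBucketMetrics p.2))

-- ===== PRECONDITION & SPEC =====
def Spec_lane_metrics_py (rows : List (List (String × String))) (out : List (String × List (String × Int))) : Prop := out = lane_metrics_py_alt rows
instance (rows : List (List (String × String))) (out : List (String × List (String × Int))) : Decidable (Spec_lane_metrics_py rows out) := by unfold Spec_lane_metrics_py; infer_instance

-- ===== CLAIM (what is proved, stated in full; the proofs are below) =====
def Claim_equal_lane_metrics_py : Prop := ∀ (rows : List (List (String × String))), Dom_lane_metrics_py rows → Spec_lane_metrics_py rows (lane_metrics_py rows)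

-- ===== LEMMAS AND PROOFS =====
-- the value-wise image of a bucket dict under pvBucketMetrics
def pvMapVals (g : PySem.Dict String (List (List (String × String)))) :
    PySem.Dict String (PySem.Dict String Int) :=
  PySem.Dict.mk (g.items.map (fun p => (p.1, PySem.Dict.mk (pvBucketMetrics p.2))))

theorem pvLaneUpdate_bucket (b : List (List (String × String))) (row : List (String × String)) :
    pvLaneUpdate (PySem.Dict.mk (pvBucketMetrics b)) row
      = PySem.Dict.mk (pvBucketMetrics (b ++ [row])) := by
  unfold pvLaneUpdate pvBucketMetrics
  split_ifs with h1 h2 h3 <;>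
    simp_all [PySem.Dict.modify, PySem.Dict.insert, PySem.Dict.getD, PySem.Dict.get?,
      List.countP_append]

theorem pvMapVals_contains (g : PySem.Dict String (List (List (String × String)))) (k : String) :
    (pvMapVals g).contains k = g.contains k := by
  obtain ⟨l⟩ := g
  induction l with
  | nil => rfl
  | cons p rest ih => simpa [pvMapVals, PySem.Dict.contains] using congrArg _ ih

theorem pvMapVals_get? (g : PySem.Dict String (List (List (String × String)))) (k : String) :
    (pvMapVals g).get? k = (g.get? k).map (fun b => PySem.Dict.mk (pvBucketMetrics b)) := by
  obtain ⟨l⟩ := g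
  induction l with
  | nil => rfl
  | cons p rest ih =>
      show (PySem.Dict.mk ((p.1, PySem.Dict.mk (pvBucketMetrics p.2)) ::
          rest.map (fun p => (p.1, PySem.Dict.mk (pvBucketMetrics p.2))))).get? k = _
      rw [PySem.Dict.get?_mk_cons, PySem.Dict.get?_mk_cons]
      by_cases h : p.1 == k
      · simp [h]
      · simp only [h, Bool.false_eq_true, if_false]
        exact ih

theorem pvStep_comm (g : PySem.Dict String (List (List (String × String))))
    (row : List (String × String)) :
    pvStepA (pvMapVals g) row = pvMapVals (pvStepB g row) := by
  simp only [pvStepA, pvStepB, PySem.Dict.modify]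
  by_cases h : g.contains (pvCoerce (pvRowGet row "system_label")) = true
  · -- existing lane
    obtain ⟨b, hb⟩ : ∃ b, g.get? (pvCoerce (pvRowGet row "system_label")) = some b := by
      have := PySem.Dict.contains_eq_isSome_get? g (pvCoerce (pvRowGet row "system_label"))
      rw [h] at this
      exact Option.isSome_iff_exists.mp this.symm
    have hc : (pvMapVals g).contains (pvCoerce (pvRowGet row "system_label")) = true := by
      rw [pvMapVals_contains]; exact h
    rw [PySem.Dict.setdefault_of_contains _ _ hc, pvMapVals_get?, hb,
      PySem.Dict.getD_of_get?_eq_some g [] hb]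
    simp only [Option.map_some, Option.getD_some]
    rw [pvLaneUpdate_bucket]
    apply PySem.Dict.ext
    rw [PySem.Dict.items_insert_of_contains _ _ hc,
      show (pvMapVals (g.insert (pvCoerce (pvRowGet row "system_label")) (b ++ [row]))).items
        = (g.insert (pvCoerce (pvRowGet row "system_label")) (b ++ [row])).items.map
            (fun p => (p.1, PySem.Dict.mk (pvBucketMetrics p.2))) from rfl,
      PySem.Dict.items_insert_of_contains _ _ h]
    show ((g.items.map _).map _) = _
    rw [List.map_map, List.map_map]
    apply List.map_congr_left
    intro p _
    by_cases hp : p.1 = pvCoerce (pvRowGet row "system_label") <;> simp [hp]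
  · -- fresh lane
    have h' : g.contains (pvCoerce (pvRowGet row "system_label")) = false := by simpa using h
    have hc : (pvMapVals g).contains (pvCoerce (pvRowGet row "system_label")) = false := by
      rw [pvMapVals_contains]; exact h'
    rw [PySem.Dict.setdefault_of_not_contains _ _ hc, PySem.Dict.get?_insert_self]
    simp only [Option.getD_some]
    rw [PySem.Dict.insert_insert_self]
    have hd : pvDefaultLane = PySem.Dict.mk (pvBucketMetrics []) := by decide
    rw [hd, pvLaneUpdate_bucket, PySem.Dict.getD_of_not_contains _ _ h']
    apply PySem.Dict.ext
    rw [PySem.Dict.items_insert_of_not_contains _ _ hc,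
      show (pvMapVals (g.insert (pvCoerce (pvRowGet row "system_label")) ([] ++ [row]))).items
        = (g.insert (pvCoerce (pvRowGet row "system_label")) ([] ++ [row])).items.map
            (fun p => (p.1, PySem.Dict.mk (pvBucketMetrics p.2))) from rfl,
      PySem.Dict.items_insert_of_not_contains _ _ h']
    simp [pvMapVals]

theorem pv_fold_comm (l : List (List (String × String)))
    (g : PySem.Dict String (List (List (String × String)))) :
    l.foldl pvStepA (pvMapVals g) = pvMapVals (l.foldl pvStepB g) := by
  induction l generalizing g with
  | nil => rfl
  | cons row rest ih => rw [List.foldl_cons, List.foldl_cons, pvStep_comm, ih]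

-- ===== VERDICT (by name: the statement is the Claim_ definition above) =====
theorem lane_metrics_py_spec : Claim_equal_lane_metrics_py := by
  intro rows _
  unfold Spec_lane_metrics_py lane_metrics_py lane_metrics_py_alt
  have h0 : (PySem.Dict.empty : PySem.Dict String (PySem.Dict String Int))
      = pvMapVals PySem.Dict.empty := rfl
  rw [h0, pv_fold_comm]
  show ((rows.foldl pvStepB PySem.Dict.empty).items.map _).map _ = _
  rw [List.map_map]
  rfl
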